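-- pv_equiv track=rewrite | github.com/shekarramaswamy4/twitter-autofollow | main.py | count_mutuals
-- ===== SOURCE A (Python) =====
-- def count_mutuals(following, followers):
--     count = 0
--
--     # minor performance optimization to lesson number of iterations
--     if len(following) < len(followers):
--         for usr in following.keys():
--             if usr in followers:
--                 count += 1
--         return count
--
--     for usr in followers.keys():
--         if usr in following:
--             count += 1
--     return count
-- ===== SOURCE B (Python) =====
-- def count_mutuals(following, followers):
--     # Sort the combined key lists; since each dict's keys are unique, a key is
--     # mutual exactly when it appears twice, i.e. as an adjacent equal pair.
--     keys = sorted(list(following) + list(followers))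
--     return sum(1 for prev, cur in zip(keys, keys[1:]) if prev == cur)
-- ===== Notes on version B (the rewrite author's own statement) =====
-- stated objective: alternative
-- what changed: Instead of iterating one dict and probing the other with membership tests, B concatenates the two key lists, sorts them, and counts adjacent equal pairs (a key is mutual iff it occurs twice in the merged sorted list, dict keys being unique).
import Mathlib
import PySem

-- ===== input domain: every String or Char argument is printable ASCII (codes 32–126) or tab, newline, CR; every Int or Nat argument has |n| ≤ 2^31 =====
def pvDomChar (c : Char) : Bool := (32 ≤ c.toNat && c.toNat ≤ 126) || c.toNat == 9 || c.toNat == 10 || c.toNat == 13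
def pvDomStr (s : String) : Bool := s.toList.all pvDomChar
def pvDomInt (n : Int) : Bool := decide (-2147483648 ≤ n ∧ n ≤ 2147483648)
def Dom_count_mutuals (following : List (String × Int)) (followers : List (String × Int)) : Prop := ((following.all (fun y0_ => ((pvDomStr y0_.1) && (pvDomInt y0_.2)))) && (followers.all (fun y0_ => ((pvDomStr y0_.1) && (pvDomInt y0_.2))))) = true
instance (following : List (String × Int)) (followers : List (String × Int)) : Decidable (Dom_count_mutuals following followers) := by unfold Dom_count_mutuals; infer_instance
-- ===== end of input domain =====

-- B replaces the membership-probing loop by sorting the merged key list and counting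
-- adjacent equal pairs: an alternative algorithm of similar cost, no speed claim.
-- ===== PORT A =====
-- Port of A: length guard, then a counting loop over the smaller dict's keys probing the other dict.
def count_mutuals (following : List (String × Int)) (followers : List (String × Int)) : Int :=
  let count : Int := 0
  if following.length < followers.length then
    (following.map Prod.fst).foldl
      (fun count usr => if (followers.map Prod.fst).contains usr then count + 1 else count) count
  else
    (followers.map Prod.fst).foldl
      (fun count usr => if (following.map Prod.fst).contains usr then count + 1 else count) count

-- ===== PORT B =====
-- Port of B: keys = sorted(list(following) + list(followers));
-- sum(1 for prev, cur in zip(keys, keys[1:]) if prev == cur).  keys[1:] = keys.drop 1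
-- (PySem.List.slice_from); the 0/1-generator sum is a countP (PySem.List.sum_map_ite_one_zero).
def count_mutuals_alt' (F G : List String) : Int :=
  let keys := PySem.List.sorted (F ++ G) (fun x => x) false
  ((keys.zip (keys.drop 1)).countP (fun p => p.1 == p.2) : Int)

def count_mutuals_alt (following : List (String × Int)) (followers : List (String × Int)) : Int :=
  count_mutuals_alt' (following.map Prod.fst) (followers.map Prod.fst)

-- ===== PRECONDITION & SPEC =====
-- Pre_ requires each association list to have distinct keys: both parameters are Python dicts,
-- which cannot hold duplicate keys, so lists with repeated keys represent no dict input of A.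
def Pre_count_mutuals (following : List (String × Int)) (followers : List (String × Int)) : Prop :=
  (following.map Prod.fst).Nodup ∧ (followers.map Prod.fst).Nodup
instance (following : List (String × Int)) (followers : List (String × Int)) : Decidable (Pre_count_mutuals following followers) := by unfold Pre_count_mutuals; infer_instance
def pvWitness_count_mutuals : (List (String × Int)) × (List (String × Int)) :=
  ([("a", 1), ("b", 2)], [("b", 5), ("c", 0)])
def Spec_count_mutuals (following : List (String × Int)) (followers : List (String × Int)) (out : Int) : Prop := out = count_mutuals_alt following followers
instance (following : List (String × Int)) (followers : List (String × Int)) (out : Int) : Decidable (Spec_count_mutuals following followers out) := by unfold Spec_count_mutuals; infer_instance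

-- ===== CLAIM (what is proved, stated in full; the proofs are below) =====
def Claim_equal_count_mutuals : Prop := ∀ (following : List (String × Int)) (followers : List (String × Int)), Dom_count_mutuals following followers → Pre_count_mutuals following followers → Spec_count_mutuals following followers (count_mutuals following followers)

-- ===== LEMMAS AND PROOFS =====

-- In a ≤-sorted list the number of adjacent equal pairs is length minus number of distinct values.
theorem adj_dup_count_sorted (L : List String) (h : L.Pairwise (· ≤ ·)) :
    ((L.zip (L.drop 1)).countP (fun p => p.1 == p.2) : Int) =
      (L.length : Int) - (L.toFinset.card : Int) := by
  induction L with
  | nil => simp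
  | cons x t ih =>
    match t, h with
    | [], _ => simp
    | y :: r, h =>
      have hhead : ∀ z ∈ y :: r, x ≤ z := (List.pairwise_cons.mp h).1
      have htail : (y :: r).Pairwise (· ≤ ·) := (List.pairwise_cons.mp h).2
      have ih' := ih htail
      simp only [List.zip, List.drop, List.zipWith_cons_cons, List.countP_cons] at *
      by_cases hxy : x = y
      · subst hxy
        have hmem : x ∈ (x :: r).toFinset := by simp
        rw [List.toFinset_cons, Finset.insert_eq_self.mpr hmem]
        simp only [beq_self_eq_true, List.length_cons] at ih' ⊢
        push_cast at ih' ⊢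
        omega
      · have hlt : x < y := lt_of_le_of_ne (hhead y (by simp)) hxy
        have hnot : x ∉ (y :: r).toFinset := by
          simp only [List.toFinset_cons, Finset.mem_insert, List.mem_toFinset]
          push Not
          refine ⟨hxy, fun hz => ?_⟩
          have : y ≤ x := (List.pairwise_cons.mp htail).1 x hz
          exact absurd (lt_of_lt_of_le hlt this) (lt_irrefl x)
        rw [List.toFinset_cons, Finset.card_insert_of_notMem hnot]
        have hbe : ((x == y) = true) = False := by simp [hxy]
        simp only [hxy, beq_iff_eq, if_false, List.length_cons] at ih' ⊢
        push_cast at ih' ⊢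
        omega

-- One branch of A's loop is a countP of membership tests.
theorem a_branch_eq_inter_card (F G : List String) (hF : F.Nodup) :
    F.foldl (fun c usr => if G.contains usr then c + 1 else c) (0 : Int) =
      ((F.toFinset ∩ G.toFinset).card : Int) := by
  rw [PySem.List.foldl_count_if, zero_add]
  have : F.countP (fun usr => G.contains usr) = (F.toFinset ∩ G.toFinset).card := by
    rw [List.countP_eq_length_filter, ← List.toFinset_card_of_nodup (hF.filter _),
      List.toFinset_filter]
    congr 1
    ext z
    simp [Finset.mem_filter, Finset.mem_inter]
  exact_mod_cast this

-- B computes the size of the key-set intersection.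
theorem b_eq_inter_card (F G : List String) (hF : F.Nodup) (hG : G.Nodup) :
    count_mutuals_alt' F G = ((F.toFinset ∩ G.toFinset).card : Int) := by
  unfold count_mutuals_alt'
  set L := PySem.List.sorted (F ++ G) (fun x => x) false with hL
  have hperm : L.Perm (F ++ G) := PySem.List.sorted_perm _ _ _
  have hsorted : L.Pairwise (· ≤ ·) := by
    simpa using PySem.List.sorted_pairwise (F ++ G) (fun x => x)
  rw [adj_dup_count_sorted L hsorted, hperm.length_eq, (List.toFinset_eq_of_perm _ _ hperm)]
  have hcard := Finset.card_union_add_card_inter F.toFinset G.toFinset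
  have hFc : F.toFinset.card = F.length := List.toFinset_card_of_nodup hF
  have hGc : G.toFinset.card = G.length := List.toFinset_card_of_nodup hG
  rw [List.toFinset_append]
  simp only [List.length_append]
  push_cast
  omega

theorem count_mutuals_spec : Claim_equal_count_mutuals := by
  intro following followers _ hpre
  obtain ⟨hF, hG⟩ := hpre
  unfold Spec_count_mutuals count_mutuals
  rw [show count_mutuals_alt following followers = count_mutuals_alt' (following.map Prod.fst) (followers.map Prod.fst) from rfl]
  rw [b_eq_inter_card _ _ hF hG]
  simp only []
  split
  · rw [a_branch_eq_inter_card _ _ hF]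
  · rw [a_branch_eq_inter_card _ _ hG, Finset.inter_comm]
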